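-- pv_equiv track=rewrite | github.com/vm6502q/pyqrack-examples | rcs/rcs_nn_ace_mirror.py | factor_width
-- ===== SOURCE A (Python) =====
-- import math
--
-- def factor_width(width):
--     row_len = math.floor(math.sqrt(width))
--     while (((width // row_len) * row_len) != width):
--         row_len -= 1
--     col_len = width // row_len
--     if row_len == 1:
--         raise Exception("ERROR: Can't simulate prime number width!")
--
--     return (row_len, col_len)
-- ===== SOURCE B (Python) =====
-- import math
--
-- def factor_width(width):
--     limit = math.isqrt(width)  # floor(sqrt(width)); raises ValueError on negatives like math.sqrt
--     # trial-divide width into its prime factors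
--     primes = []
--     n = width
--     for p in range(2, limit + 1):
--         while n % p == 0:
--             primes.append(p)
--             n //= p
--     if n > 1:
--         primes.append(n)
--     # generate all divisors of width from the prime factorization
--     divisors = {1}
--     for q in primes:
--         divisors = divisors | {d * q for d in divisors}
--     row_len = max(d for d in divisors if d <= limit)
--     if row_len == 1:
--         raise Exception("ERROR: Can't simulate prime number width!")
--     return (row_len, width // row_len)
-- ===== Notes on version B (the rewrite author's own statement) =====
-- stated objective: alternative
-- what changed: B replaces A's countdown-from-sqrt trial scan by factorizing width into primes and generating its full divisor set, then taking the largest divisor <= isqrt(width).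
import Mathlib
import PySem

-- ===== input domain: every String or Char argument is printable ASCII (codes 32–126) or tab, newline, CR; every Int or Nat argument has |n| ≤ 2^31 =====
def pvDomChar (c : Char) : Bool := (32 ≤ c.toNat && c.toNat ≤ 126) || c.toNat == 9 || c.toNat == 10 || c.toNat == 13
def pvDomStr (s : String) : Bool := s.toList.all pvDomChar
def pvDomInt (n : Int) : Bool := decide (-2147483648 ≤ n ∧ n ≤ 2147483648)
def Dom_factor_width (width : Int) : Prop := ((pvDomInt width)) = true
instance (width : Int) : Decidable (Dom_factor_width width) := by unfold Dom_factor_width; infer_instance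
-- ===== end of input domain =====

-- B factorizes width and generates its divisor set instead of A's countdown scan from sqrt (alternative
-- decomposition, similar cost). Equivalence is proved on composite widths ≥ 4, exactly where A returns.

-- ===== PORT A =====
-- A's while loop: row_len counts down from floor(sqrt(width)) until it divides width.
-- math.floor(math.sqrt(width)) is ported as Int.sqrt, exact on Dom (0 ≤ width ≤ 2^31, where the
-- double sqrt's floor equals isqrt). The fuel-style Nat argument IS the loop counter itself;
-- the 0 case is Python's ZeroDivisionError path (width = 0), excluded by Pre_.
def pvAloop (width : Int) : Nat → Int
  | 0 => 0
  | (r+1) =>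
      if PySem.Int.floordiv width ((r : Int) + 1) * ((r : Int) + 1) = width then ((r : Int) + 1)
      else pvAloop width r

def factor_width (width : Int) : Int × Int :=
  let row_len := pvAloop width (Int.sqrt width).toNat
  let col_len := PySem.Int.floordiv width row_len
  (row_len, col_len)

-- ===== PORT B =====
-- inner 'while n % p == 0: primes.append(p); n //= p' of B; the Nat argument is a totality
-- guard only (width.toNat steps always suffice, since n shrinks by a factor ≥ 2 each pass)
def pvPull (p : Int) : Nat → Int → (List Int × Int)
  | 0, n => ([], n)
  | (f+1), n =>
      if PySem.Int.mod n p = 0 then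
        let r := pvPull p f (PySem.Int.floordiv n p)
        (p :: r.1, r.2)
      else ([], n)

def factor_width_alt (width : Int) : Int × Int :=
  let limit := Int.sqrt width          -- math.isqrt(width), exact for width ≥ 0
  let pr := (PySem.List.pyRange 2 (limit + 1)).foldl
      (fun (acc : List Int × Int) p =>
        let r := pvPull p width.toNat acc.2
        (acc.1 ++ r.1, r.2)) ([], width)
  let primes := if pr.2 > 1 then pr.1 ++ [pr.2] else pr.1
  let divisors := primes.foldl
      (fun (ds : PySem.Set Int) q => PySem.Set.union ds (PySem.Set.ofList (ds.map (fun d => d * q))))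
      (PySem.Set.ofList [1])
  -- max(d for d in divisors if d <= limit); .getD 0 is the (unreachable under Pre_) ValueError path
  let row_len := (PySem.List.max? (divisors.filter (fun d => d ≤ limit)) (fun y => y)).getD 0
  (row_len, PySem.Int.floordiv width row_len)

-- ===== PRECONDITION & SPEC =====
-- Pre_ admits exactly the composite widths of at least four; on every other width A raises
-- (math.sqrt's ValueError, a ZeroDivisionError, or the explicit 'prime number width' Exception).
def Pre_factor_width (width : Int) : Prop := 4 ≤ width ∧ ¬ Nat.Prime width.toNat
instance (width : Int) : Decidable (Pre_factor_width width) := by unfold Pre_factor_width; infer_instance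
def pvWitness_factor_width : Int := 6

def Spec_factor_width (width : Int) (out : Int × Int) : Prop := out = factor_width_alt width
instance (width : Int) (out : Int × Int) : Decidable (Spec_factor_width width out) := by unfold Spec_factor_width; infer_instance

-- ===== CLAIM (what is proved, stated in full; the proofs are below) =====
def Claim_equal_factor_width : Prop := ∀ (width : Int), Dom_factor_width width → Pre_factor_width width → Spec_factor_width width (factor_width width)

-- ===== LEMMAS AND PROOFS =====

-- 'width // b * b == width' is exactly 'b divides width'
theorem pv_cond_iff_dvd (W b : Int) : PySem.Int.floordiv W b * b = W ↔ b ∣ W := by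
  have h := PySem.Int.floordiv_mul_add_mod W b
  have h2 := PySem.Int.mod_eq_zero_iff_dvd W b
  constructor
  · intro hc; exact h2.mp (by omega)
  · intro hd; have := h2.mpr hd; omega

-- A's countdown loop returns the greatest k ≤ r dividing W (provided one exists)
theorem pv_aloop_spec (W : Int) : ∀ (r : Nat),
    (∃ k : Nat, 0 < k ∧ k ≤ r ∧ (k : Int) ∣ W) →
    (pvAloop W r ∣ W ∧ 0 < pvAloop W r ∧ pvAloop W r ≤ (r : Int) ∧
      ∀ j : Nat, j ≤ r → (j : Int) ∣ W → (j : Int) ≤ pvAloop W r) := by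
  intro r
  induction r with
  | zero => rintro ⟨k, hk, hkr, _⟩; omega
  | succ r ih =>
    rintro ⟨k, hk0, hkr, hkd⟩
    by_cases hc : PySem.Int.floordiv W ((r : Int) + 1) * ((r : Int) + 1) = W
    · have hd : ((r : Int) + 1) ∣ W := (pv_cond_iff_dvd W _).mp hc
      simp only [pvAloop, hc, if_pos]
      refine ⟨hd, by positivity, le_refl _, ?_⟩
      intro j hj _; exact_mod_cast by omega
    · have hnd : ¬ ((r : Int) + 1) ∣ W := fun h => hc ((pv_cond_iff_dvd W _).mpr h)
      have hkr' : k ≤ r := by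
        rcases Nat.lt_or_ge k (r+1) with h | h
        · omega
        · exfalso; apply hnd; have : k = r + 1 := by omega
          subst this; exact_mod_cast hkd
      simp only [pvAloop, hc, if_false]
      obtain ⟨h1, h2, h3, h4⟩ := ih ⟨k, hk0, hkr', hkd⟩
      refine ⟨h1, h2, by push_cast; omega, ?_⟩
      intro j hj hjd
      rcases Nat.lt_or_ge j (r+1) with h | h
      · exact h4 j (by omega) hjd
      · exfalso; apply hnd; have : j = r + 1 := by omega
        subst this; exact_mod_cast hjd

-- spec of the inner division loop: it returns copies of p and a p-free cofactor
theorem pv_pull_spec (p : Int) (hp : 2 ≤ p) : ∀ (f : Nat) (n : Int), 0 < n → n.toNat ≤ f →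
    ((∀ q ∈ (pvPull p f n).1, q = p) ∧ (pvPull p f n).1.prod * (pvPull p f n).2 = n ∧
      0 < (pvPull p f n).2 ∧ ¬ p ∣ (pvPull p f n).2) := by
  intro f
  induction f with
  | zero => intro n hn hf; omega
  | succ f ih =>
    intro n hn hf
    by_cases hc : PySem.Int.mod n p = 0
    · have hd : p ∣ n := (PySem.Int.mod_eq_zero_iff_dvd n p).mp hc
      have heq : PySem.Int.floordiv n p * p = n := (pv_cond_iff_dvd n p).mpr hd
      set n' := PySem.Int.floordiv n p with hn'
      have hn'pos : 0 < n' := by nlinarith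
      have hn'lt : n' < n := by nlinarith
      obtain ⟨h1, h2, h3, h4⟩ := ih n' hn'pos (by omega)
      simp only [pvPull, hc, if_pos]
      refine ⟨?_, ?_, h3, h4⟩
      · intro q hq
        rcases List.mem_cons.mp hq with h | h
        · exact h
        · exact h1 q h
      · simp only [List.prod_cons]
        calc p * (pvPull p f n').1.prod * (pvPull p f n').2
            = p * ((pvPull p f n').1.prod * (pvPull p f n').2) := by ring
          _ = p * n' := by rw [h2]
          _ = n := by linarith [heq]
    · have hnd : ¬ p ∣ n := fun h => hc ((PySem.Int.mod_eq_zero_iff_dvd n p).mpr h)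
      simp only [pvPull, hc, if_false]
      exact ⟨by intro q hq; simp at hq, by simp, hn, hnd⟩

-- invariant of B's trial-division fold over range(2, t)
theorem pv_trial_spec (W : Int) (hW : 0 < W) : ∀ (t : Nat),
    (∀ q ∈ ((PySem.List.pyRange 2 ((2 : Int) + t)).foldl
        (fun (acc : List Int × Int) p => let r := pvPull p W.toNat acc.2; (acc.1 ++ r.1, r.2))
        ([], W)).1, 2 ≤ q ∧ Prime q) ∧
    ((PySem.List.pyRange 2 ((2 : Int) + t)).foldl
        (fun (acc : List Int × Int) p => let r := pvPull p W.toNat acc.2; (acc.1 ++ r.1, r.2))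
        ([], W)).1.prod *
      ((PySem.List.pyRange 2 ((2 : Int) + t)).foldl
        (fun (acc : List Int × Int) p => let r := pvPull p W.toNat acc.2; (acc.1 ++ r.1, r.2))
        ([], W)).2 = W ∧
    0 < ((PySem.List.pyRange 2 ((2 : Int) + t)).foldl
        (fun (acc : List Int × Int) p => let r := pvPull p W.toNat acc.2; (acc.1 ++ r.1, r.2))
        ([], W)).2 ∧
    (∀ j : Int, 2 ≤ j → j < (2 : Int) + t →
      ¬ j ∣ ((PySem.List.pyRange 2 ((2 : Int) + t)).foldl
        (fun (acc : List Int × Int) p => let r := pvPull p W.toNat acc.2; (acc.1 ++ r.1, r.2))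
        ([], W)).2) := by
  intro t
  induction t with
  | zero =>
    rw [show ((2:Int) + (0:Nat)) = 2 by norm_num, PySem.List.pyRange_one_eq_nil (le_refl 2)]
    simp only [List.foldl_nil]
    refine ⟨by intro q hq; simp at hq, by simp, hW, by intro j h1 h2 _; omega⟩
  | succ t ih =>
    obtain ⟨ih1, ih2, ih3, ih4⟩ := ih
    set st := (PySem.List.pyRange 2 ((2 : Int) + t)).foldl
        (fun (acc : List Int × Int) p => let r := pvPull p W.toNat acc.2; (acc.1 ++ r.1, r.2))
        ([], W) with hst
    have hsplit : PySem.List.pyRange 2 ((2:Int) + (t+1:Nat)) =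
        PySem.List.pyRange 2 ((2:Int) + t) ++ [(2:Int) + t] := by
      rw [show ((2:Int) + (t+1:Nat)) = ((2:Int) + t) + 1 by push_cast; ring]
      exact PySem.List.pyRange_one_succ_right (by omega)
    rw [hsplit, List.foldl_append]
    set p := (2:Int) + (t:Int) with hpdef
    have hp2 : 2 ≤ p := by omega
    -- the cofactor st.2 divides W, hence fits in the fuel
    have hdvdW : st.2 ∣ W := Dvd.intro_left _ ih2
    have hle : st.2.toNat ≤ W.toNat := by
      have := Int.le_of_dvd hW hdvdW; omega
    obtain ⟨h1, h2, h3, h4⟩ := pv_pull_spec p hp2 W.toNat st.2 ih3 hle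
    simp only [List.foldl_cons, List.foldl_nil]
    set r := pvPull p W.toNat st.2 with hrdef
    have hr2dvd : r.2 ∣ st.2 := Dvd.intro_left _ h2
    refine ⟨?_, ?_, h3, ?_⟩
    · -- primality of every collected factor
      intro q hq
      rcases List.mem_append.mp hq with h | h
      · exact ih1 q h
      · have hqp : q = p := h1 q h
        subst hqp
        -- q = p divides st.2 (since r.1 is nonempty, p ∣ r.1.prod ∣ st.2)
        refine ⟨hp2, ?_⟩
        have hpdvd : p ∣ st.2 := by
          have h5 : p ∣ r.1.prod := List.dvd_prod h
          have h6 : r.1.prod ∣ st.2 := Dvd.intro _ h2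
          exact h5.trans h6
        -- p has no divisor in [2, p), because any such would divide st.2
        rw [Int.prime_iff_natAbs_prime]
        rw [Nat.prime_def_lt]
        constructor
        · omega
        · intro m hm hmd
          by_contra hm1
          have hm0 : m ≠ 0 := by
            rintro rfl
            have := Nat.eq_zero_of_zero_dvd hmd; omega
          have hm2 : 2 ≤ m := by omega
          have hmdInt : (m:Int) ∣ p := by
            have : (m:Int) ∣ (p.natAbs : Int) := Int.natCast_dvd_natCast.mpr hmd
            rwa [Int.natAbs_of_nonneg (by omega)] at this
          exact ih4 (m:Int) (by exact_mod_cast hm2)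
            (by have : (m:Int) < (p.natAbs : Int) := by exact_mod_cast hm
                rwa [Int.natAbs_of_nonneg (by omega)] at this)
            (hmdInt.trans hpdvd)
    · -- product invariant
      rw [List.prod_append]
      calc (st.1.prod * r.1.prod) * r.2 = st.1.prod * (r.1.prod * r.2) := by ring
        _ = st.1.prod * st.2 := by rw [h2]
        _ = W := ih2
    · -- no divisor of the cofactor in [2, p+1)
      intro j hj1 hj2 hjd
      have hj2' : j < p + 1 := by
        rw [hpdef]; push_cast at hj2 ⊢; linarith
      rcases lt_or_eq_of_le (by omega : j ≤ p) with h | h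
      · exact ih4 j hj1 (by rw [hpdef] at h ⊢; exact_mod_cast h) (hjd.trans hr2dvd)
      · subst h; exact h4 hjd

-- soundness of the divisor-set fold: every element is (init element) * (a positive divisor of L.prod)
theorem pv_gen_sound (L : List Int) (hL : ∀ q ∈ L, 0 < q) :
    ∀ (init : PySem.Set Int) (x : Int),
      x ∈ L.foldl (fun (ds : PySem.Set Int) q =>
          PySem.Set.union ds (PySem.Set.ofList (ds.map (fun d => d * q)))) init →
      ∃ e ∈ init, ∃ c : Int, 0 < c ∧ c ∣ L.prod ∧ x = e * c := by
  induction L with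
  | nil => intro init x hx; exact ⟨x, hx, 1, one_pos, one_dvd _, (mul_one x).symm⟩
  | cons q L' ih =>
    intro init x hx
    have hq : 0 < q := hL q (List.mem_cons_self ..)
    have hL' : ∀ r ∈ L', 0 < r := fun r hr => hL r (List.mem_cons_of_mem _ hr)
    simp only [List.foldl_cons] at hx
    obtain ⟨e', he', c', hc'0, hc'd, hx'⟩ := ih hL' _ x hx
    rcases (PySem.Set.mem_union _ _ _).mp he' with h | h
    · exact ⟨e', h, c', hc'0, by simpa using Dvd.dvd.mul_left hc'd q, hx'⟩
    · obtain ⟨e, he, rfl⟩ := List.mem_map.mp ((PySem.Set.mem_ofList _ _).mp h)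
      exact ⟨e, he, q * c', by positivity, by simpa using mul_dvd_mul_left q hc'd, by rw [hx']; ring⟩

-- completeness: every positive divisor of L.prod (L all prime) times an init element is generated
theorem pv_gen_complete (L : List Int) (hL : ∀ q ∈ L, 2 ≤ q ∧ Prime q) :
    ∀ (init : PySem.Set Int) (e d : Int), e ∈ init → 0 < d → d ∣ L.prod →
      e * d ∈ L.foldl (fun (ds : PySem.Set Int) q =>
          PySem.Set.union ds (PySem.Set.ofList (ds.map (fun d => d * q)))) init := by
  induction L with
  | nil =>
    intro init e d he hd0 hdd
    simp only [List.prod_nil] at hdd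
    have : d = 1 := by
      rcases Int.isUnit_iff.mp (isUnit_of_dvd_one hdd) with h | h
      · exact h
      · omega
    simpa [this] using he
  | cons q L' ih =>
    intro init e d he hd0 hdd
    obtain ⟨hq2, hqp⟩ := hL q (List.mem_cons_self ..)
    have hL' : ∀ r ∈ L', 2 ≤ r ∧ Prime r := fun r hr => hL r (List.mem_cons_of_mem _ hr)
    simp only [List.prod_cons] at hdd
    simp only [List.foldl_cons]
    by_cases hqd : q ∣ d
    · obtain ⟨d', rfl⟩ := hqd
      have hd'd : d' ∣ L'.prod := (mul_dvd_mul_iff_left (by omega : q ≠ 0)).mp hdd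
      have hd'0 : 0 < d' := by nlinarith
      have heq : e * q ∈ PySem.Set.union init (PySem.Set.ofList (init.map (fun d => d * q))) :=
        (PySem.Set.mem_union _ _ _).mpr (Or.inr ((PySem.Set.mem_ofList _ _).mpr
          (List.mem_map.mpr ⟨e, he, rfl⟩)))
      have := ih hL' _ (e * q) d' heq hd'0 hd'd
      simpa [mul_assoc] using this
    · have hcop : IsCoprime d q := ((hqp.coprime_iff_not_dvd).mpr hqd).symm
      have hdd' : d ∣ L'.prod := hcop.dvd_of_dvd_mul_left hdd
      have he' : e ∈ PySem.Set.union init (PySem.Set.ofList (init.map (fun d => d * q))) :=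
        (PySem.Set.mem_union _ _ _).mpr (Or.inl he)
      exact ih hL' _ e d he' hd0 hdd'

-- ===== VERDICT (by name: the statement is the Claim_ definition above) =====
-- main assembly: A's greatest-divisor-below-sqrt equals the max of B's generated divisor set
theorem factor_width_spec : Claim_equal_factor_width := by
  intro width _ hpre
  obtain ⟨hW4, hnp⟩ := hpre
  have hW : 0 < width := by omega
  set N := width.toNat with hN
  have hNW : (N : Int) = width := Int.toNat_of_nonneg (by omega)
  have hN4 : 4 ≤ N := by omega
  set sN := Nat.sqrt N with hsN
  have hsqrt : Int.sqrt width = (sN : Int) := rfl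
  have hsN2 : 2 ≤ sN := Nat.le_sqrt.mpr (by omega)
  have hNlt : N < (sN + 1) * (sN + 1) := Nat.lt_succ_sqrt N
  -- a divisor 2 ≤ k ≤ sN exists: the least prime factor
  have hexist : ∃ k : Nat, 0 < k ∧ k ≤ sN ∧ (k : Int) ∣ width := by
    refine ⟨N.minFac, N.minFac_pos, ?_, ?_⟩
    · exact Nat.le_sqrt.mpr (by have := Nat.minFac_sq_le_self (by omega) hnp; nlinarith)
    · rw [← hNW]; exact_mod_cast N.minFac_dvd
  -- A's loop result g
  obtain ⟨hg1, hg2, hg3, hg4⟩ := pv_aloop_spec width sN hexist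
  set g := pvAloop width sN with hg
  -- B's trial-division fold
  obtain ⟨hP1, hP2, hP3, hP4⟩ := pv_trial_spec width hW (sN - 1)
  have hrange : (2 : Int) + ((sN - 1 : Nat) : Int) = (sN : Int) + 1 := by
    push_cast [Nat.cast_sub (by omega : 1 ≤ sN)]; ring
  rw [hrange] at hP1 hP2 hP3 hP4
  set st := (PySem.List.pyRange 2 ((sN : Int) + 1)).foldl
      (fun (acc : List Int × Int) p => let r := pvPull p width.toNat acc.2; (acc.1 ++ r.1, r.2))
      ([], width) with hst
  -- the primes list, in both branch cases
  set P := if st.2 > 1 then st.1 ++ [st.2] else st.1 with hP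
  have hPall : ∀ q ∈ P, 2 ≤ q ∧ Prime q := by
    rw [hP]
    split_ifs with hgt
    · intro q hq
      rcases List.mem_append.mp hq with h | h
      · exact hP1 q h
      · have hq2 : q = st.2 := by simpa using h
        subst hq2
        refine ⟨by omega, ?_⟩
        -- the remaining cofactor is prime: it has no factor ≤ sN, and a proper
        -- factorization would force one factor ≤ sN
        have hdvdW : st.2 ∣ width := Dvd.intro_left _ hP2
        have hleW : st.2 ≤ width := Int.le_of_dvd hW hdvdW
        rw [Int.prime_iff_natAbs_prime, Nat.prime_def_lt]
        have habs : (st.2.natAbs : Int) = st.2 := Int.natAbs_of_nonneg (by omega)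
        refine ⟨by omega, ?_⟩
        intro m hm hmd
        by_contra hm1
        have hm0 : m ≠ 0 := by
          rintro rfl
          have := Nat.eq_zero_of_zero_dvd hmd; omega
        have hm2 : 2 ≤ m := by omega
        have hmdInt : (m : Int) ∣ st.2 := by
          have : (m : Int) ∣ (st.2.natAbs : Int) := Int.natCast_dvd_natCast.mpr hmd
          rwa [habs] at this
        have hmlt : (m : Int) < st.2 := by
          have : (m : Int) < (st.2.natAbs : Int) := by exact_mod_cast hm
          rwa [habs] at this
        rcases Nat.lt_or_ge sN m with hbig | hsmall
        · -- m > sN: the cofactor st.2 / m is a divisor in [2, sN]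
          obtain ⟨e, he⟩ := hmdInt
          have he0 : 0 < e := by nlinarith
          have hedvd : e ∣ st.2 := Dvd.intro_left _ he.symm
          have hesN : e ≤ (sN : Int) := by
            by_contra hce
            push Not at hce
            have hmInt : ((sN : Int) + 1) ≤ (m : Int) := by exact_mod_cast hbig
            have hNlt' : width < ((sN : Int) + 1) * ((sN : Int) + 1) := by
              rw [← hNW]; exact_mod_cast hNlt
            nlinarith
          have he2 : 2 ≤ e := by
            rcases (by omega : e = 1 ∨ 2 ≤ e) with h | h
            · exfalso; rw [h, mul_one] at he; omega
            · exact h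
          exact hP4 e he2 (by omega) hedvd
        · exact hP4 (m : Int) (by exact_mod_cast hm2)
            (by exact_mod_cast Nat.lt_succ_of_le hsmall) hmdInt
    · intro q hq; exact hP1 q hq
  have hPprod : P.prod = width := by
    rw [hP]
    split_ifs with hgt
    · rw [List.prod_append]; simpa using hP2
    · have h1 : st.2 = 1 := by omega
      rw [h1, mul_one] at hP2; exact hP2
  -- the generated divisor set
  set D := P.foldl (fun (ds : PySem.Set Int) q =>
      PySem.Set.union ds (PySem.Set.ofList (ds.map (fun d => d * q)))) (PySem.Set.ofList [1])
    with hD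
  have h1mem : (1 : Int) ∈ PySem.Set.ofList [(1 : Int)] := by
    rw [PySem.Set.mem_ofList]; simp
  have hgD : g ∈ D := by
    have := pv_gen_complete P hPall (PySem.Set.ofList [1]) 1 g h1mem hg2 (hPprod ▸ hg1)
    simpa using this
  have hgfilt : g ∈ D.filter (fun d => decide (d ≤ (sN : Int))) :=
    List.mem_filter.mpr ⟨hgD, by simpa using hg3⟩
  -- B's max over the filtered set is exactly g
  obtain ⟨m, hmax⟩ : ∃ m, PySem.List.max? (D.filter (fun d => decide (d ≤ (sN : Int))))
      (fun y => y) = some m := by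
    cases hcase : PySem.List.max? (D.filter (fun d => decide (d ≤ (sN : Int)))) (fun y => y) with
    | none =>
      exfalso
      have := (PySem.List.max?_eq_none_iff _ _).mp hcase
      rw [this] at hgfilt; simp at hgfilt
    | some m => exact ⟨m, rfl⟩
  have hmfilt := PySem.List.max?_mem hmax
  have hmD : m ∈ D := (List.mem_filter.mp hmfilt).1
  have hmle : m ≤ (sN : Int) := by simpa using (List.mem_filter.mp hmfilt).2
  have hgm : g ≤ m := PySem.List.max?_isMax hmax g hgfilt
  obtain ⟨e, he, c, hc0, hcd, heq⟩ :=
    pv_gen_sound P (fun q hq => by have := (hPall q hq).1; omega) (PySem.Set.ofList [1]) m hmD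
  have he1 : e = 1 := by
    rw [PySem.Set.mem_ofList] at he; simpa using he
  have hmdvd : m ∣ width := by rw [heq, he1, one_mul, ← hPprod]; exact hcd
  have hm0 : 0 < m := by rw [heq, he1, one_mul]; exact hc0
  have hmg : m ≤ g := by
    have h1 : (m.toNat : Int) = m := Int.toNat_of_nonneg (by omega)
    have := hg4 m.toNat (by omega) (by rwa [h1])
    omega
  have hmeq : m = g := le_antisymm hmg hgm
  -- both sides reduce to (g, width // g)
  show factor_width width = factor_width_alt width
  simp only [factor_width, factor_width_alt, hsqrt, ← hst, ← hP, ← hD, Int.toNat_natCast, ← hg]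
  rw [hmax]
  simp [hmeq]
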